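-- pv_equiv track=rewrite | github.com/heatherleaf/korpsearch | elias_coding.py | delta_code_array
-- ===== SOURCE A (Python) =====
-- from collections.abc import Iterator, Sequence
--
-- def find_msb(n: int) -> tuple[int, int]:
--     assert n >= 0
--     msb = -1
--     mask = 0
--     while (n & mask) != n:
--         msb += 1
--         mask = 2*mask+1
--
--     return msb, (mask+1) >> 1
--
-- def split(n: int) -> tuple[int, int]:
--     msb, mask = find_msb(n)
--
--     return msb, n & (mask-1)
--
-- def bits(n: int, msb: int) -> Iterator[int]:
--     while msb != -1:
--         yield (n >> msb) & 1
--         msb -= 1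
--
-- def elias_gamma_code(n: int) -> Iterator[int]:
--     msb, remainder = split(n)
--
--     for _ in range(msb): yield 0
--     yield 1
--     yield from bits(remainder, msb-1)
--
-- def elias_delta_code(n: int) -> Iterator[int]:
--     msb, remainder = split(n)
--     yield from elias_gamma_code(msb+1)
--     yield from bits(remainder, msb-1)
--
-- def delta_code_array(arr: Sequence[int]) -> Iterator[int]:
--     last = None
--
--     for n in arr:
--         if last is None or n <= last:
--             # Start of new set - we can detect this via the .starts file
--             # yield from bits(n, (arr._elemsize*8)-1)
--
--             yield from elias_delta_code(1)
--             yield from elias_delta_code(n+1)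
--         else:
--             yield from elias_delta_code(n - last + 1)
--
--         last = n
-- ===== SOURCE B (Python) =====
-- def delta_code_array(arr):
--     # Stage 1: collect the integers to encode (pairwise over adjacent elements).
--     if arr:
--         vals = [1, arr[0] + 1]
--         for prev, n in zip(arr, arr[1:]):
--             if n <= prev:
--                 vals += [1, n + 1]
--             else:
--                 vals.append(n - prev + 1)
--     else:
--         vals = []
--     # Stage 2: Elias-delta encode each value via its binary string representation.
--     for v in vals:
--         b = format(v, 'b')
--         k = format(len(b), 'b')
--         for c in '0' * (len(k) - 1) + k + b[1:]:
--             yield int(c)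
-- ===== Notes on version B (the rewrite author's own statement) =====
-- stated objective: alternative
-- what changed: Replaces A's interleaved generator tower (find_msb doubling-mask loop, split, bits, gamma, delta) by two staged passes: a pairwise zip pass that first collects the list of integers to encode, then a per-value encoder that builds each Elias-delta code from the value's binary string representation (format(v,'b') slicing) instead of mask/shift arithmetic.
import Mathlib
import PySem

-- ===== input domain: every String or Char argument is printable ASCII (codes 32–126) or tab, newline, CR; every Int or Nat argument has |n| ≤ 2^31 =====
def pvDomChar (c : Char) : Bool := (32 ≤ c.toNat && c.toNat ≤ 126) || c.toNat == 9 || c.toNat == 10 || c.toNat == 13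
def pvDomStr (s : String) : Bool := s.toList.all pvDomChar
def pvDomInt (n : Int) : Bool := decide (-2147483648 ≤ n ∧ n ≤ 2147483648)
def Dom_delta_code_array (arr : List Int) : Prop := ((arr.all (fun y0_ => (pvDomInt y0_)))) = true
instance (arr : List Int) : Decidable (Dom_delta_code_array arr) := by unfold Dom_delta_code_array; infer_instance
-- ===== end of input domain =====

-- B replaces A's interleaved find_msb/split/bits/gamma generator tower by two staged passes:
-- first collect the integers to encode (pairwise over adjacent elements), then Elias-delta
-- encode each via its binary string representation (objective: alternative decomposition).

-- ===== PORT A =====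
-- find_msb's while loop, with fuel (the loop terminates for every n ≥ 0 reached under Pre_;
-- fuel 64 is never exhausted for the values encoded on the admitted domain)
def pvFindMsbAux : Nat → Int → Int → Int → Int × Int
  | 0, _, msb, mask => (msb, (mask + 1) >>> (1 : Nat))
  | fuel + 1, n, msb, mask =>
      if PySem.Int.band n mask ≠ n then pvFindMsbAux fuel n (msb + 1) (2 * mask + 1)
      else (msb, (mask + 1) >>> (1 : Nat))

def pvFindMsb (n : Int) : Int × Int := pvFindMsbAux 64 n (-1) 0

def pvSplit (n : Int) : Int × Int :=
  let p := pvFindMsb n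
  (p.1, PySem.Int.band n (p.2 - 1))

-- the bits(n, msb) generator, with fuel (msb stays ≥ -1 under Pre_)
def pvBitsAux : Nat → Int → Int → List Int
  | 0, _, _ => []
  | fuel + 1, n, msb =>
      if msb ≠ -1 then PySem.Int.band (n >>> msb.toNat) 1 :: pvBitsAux fuel n (msb - 1)
      else []

def pvBits (n msb : Int) : List Int := pvBitsAux 64 n msb

def pvEliasGamma (n : Int) : List Int :=
  let p := pvSplit n
  (PySem.List.pyRange 0 p.1 1).map (fun _ => 0) ++ [1] ++ pvBits p.2 (p.1 - 1)

def pvEliasDelta (n : Int) : List Int :=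
  let p := pvSplit n
  pvEliasGamma (p.1 + 1) ++ pvBits p.2 (p.1 - 1)

def pvLoopA : List Int → Option Int → List Int
  | [], _ => []
  | n :: rest, last =>
      (match last with
       | none => pvEliasDelta 1 ++ pvEliasDelta (n + 1)
       | some l =>
          if n ≤ l then pvEliasDelta 1 ++ pvEliasDelta (n + 1)
          else pvEliasDelta (n - l + 1)) ++ pvLoopA rest (some n)

def delta_code_array (arr : List Int) : List Int := pvLoopA arr none

-- ===== PORT B =====
-- binary digits of a positive Nat, most significant first (format(m,'b') for m ≥ 1)
def pvBinNat : Nat → List Char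
  | 0 => []
  | n + 1 => pvBinNat ((n + 1) / 2) ++ [if (n + 1) % 2 = 1 then '1' else '0']
decreasing_by omega

-- format(v, 'b')
def pvBin (v : Int) : List Char :=
  if v = 0 then ['0']
  else if v < 0 then '-' :: pvBinNat (-v).toNat
  else pvBinNat v.toNat

-- stage 1: the zip(arr, arr[1:]) pass
def pvValsPairs : Int → List Int → List Int
  | _, [] => []
  | prev, n :: rest =>
      (if n ≤ prev then [1, n + 1] else [n - prev + 1]) ++ pvValsPairs n rest

def pvVals : List Int → List Int
  | [] => []
  | n :: rest => 1 :: (n + 1) :: pvValsPairs n rest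

-- stage 2: one value's code; int(c) is ported for the digit chars '0'/'1' this code
-- produces on Pre_ (Python's int('-') raises, outside Pre_)
def pvEncode (v : Int) : List Int :=
  let b := pvBin v
  let k := pvBin (b.length : Int)
  (List.replicate (k.length - 1) '0' ++ k ++ b.drop 1).map
    (fun c => if c = '1' then (1 : Int) else 0)

def delta_code_array_alt (arr : List Int) : List Int := (pvVals arr).flatMap pvEncode

-- ===== PRECONDITION & SPEC =====
-- Pre_ excludes arrays containing a negative element: there A raises (AssertionError in
-- find_msb, or ValueError from a negative shift count) or loops forever; A returns
-- normally on every all-nonnegative array.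
def Pre_delta_code_array (arr : List Int) : Prop := ∀ x ∈ arr, 0 ≤ x
instance (arr : List Int) : Decidable (Pre_delta_code_array arr) := by
  unfold Pre_delta_code_array; infer_instance

def pvWitness_delta_code_array : List Int := [5, 7, 2]

def Spec_delta_code_array (arr : List Int) (out : List Int) : Prop := out = delta_code_array_alt arr
instance (arr : List Int) (out : List Int) : Decidable (Spec_delta_code_array arr out) := by
  unfold Spec_delta_code_array; infer_instance

-- ===== CLAIM (what is proved, stated in full; the proofs are below) =====
def Claim_equal_delta_code_array : Prop :=
  ∀ (arr : List Int), Dom_delta_code_array arr → Pre_delta_code_array arr →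
    Spec_delta_code_array arr (delta_code_array arr)

-- ===== LEMMAS AND PROOFS =====

-- reference: the t bits of n, high to low
def pvBitsOf (n t : Nat) : List Int :=
  (List.range t).map (fun k => (((n >>> (t - 1 - k)) &&& 1 : Nat) : Int))

lemma pvFindMsbAux_eq (m L : Nat) (h1 : 2 ^ (L - 1) ≤ m) (h2 : m < 2 ^ L) (hL : 1 ≤ L) :
    ∀ fuel j, j ≤ L → L - j < fuel →
      pvFindMsbAux fuel (m : Int) ((j : Int) - 1) ((2 : Int) ^ j - 1) =
        ((L : Int) - 1, ((2 ^ (L - 1) : Nat) : Int)) := by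
  intro fuel
  induction fuel with
  | zero => intro j hj hf; omega
  | succ f ih =>
    intro j hj hf
    have hcast : ((2 : Int) ^ j - 1) = ((2 ^ j - 1 : Nat) : Int) := by
      have : 1 ≤ 2 ^ j := Nat.one_le_two_pow
      push_cast [this]; ring
    have hband : PySem.Int.band (m : Int) ((2 : Int) ^ j - 1) = ((m % 2 ^ j : Nat) : Int) := by
      rw [hcast, PySem.Int.band_natCast, Nat.and_two_pow_sub_one_eq_mod]
    rcases eq_or_lt_of_le hj with rfl | hjL
    · -- j = L : loop exits
      have hmod : ((m % 2 ^ j : Nat) : Int) = (m : Int) := by rw [Nat.mod_eq_of_lt h2]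
      simp only [pvFindMsbAux, hband, hmod]
      rw [if_neg (by simp)]
      rw [Prod.mk.injEq]
      refine ⟨rfl, ?_⟩
      have : (2 : Int) ^ j - 1 + 1 = ((2 ^ j : Nat) : Int) := by push_cast; ring
      rw [this, ← Int.natCast_shiftRight]
      congr 1
      rw [Nat.shiftRight_eq_div_pow, pow_one, Nat.pow_div hL (by norm_num)]
    · -- j < L : loop continues
      have hne : m % 2 ^ j ≠ m := by
        have hlt : m % 2 ^ j < 2 ^ j := Nat.mod_lt _ (Nat.two_pow_pos _)
        have hle : 2 ^ j ≤ 2 ^ (L - 1) := Nat.pow_le_pow_right (by norm_num) (by omega)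
        omega
      have hne' : ((m % 2 ^ j : Nat) : Int) ≠ (m : Int) := by exact_mod_cast hne
      simp only [pvFindMsbAux, hband, ne_eq, hne', not_false_eq_true, if_pos]
      have e1 : (j : Int) - 1 + 1 = ((j + 1 : Nat) : Int) - 1 := by push_cast; ring
      have e2 : 2 * ((2 : Int) ^ j - 1) + 1 = (2 : Int) ^ (j + 1) - 1 := by ring
      rw [e1, e2]
      exact ih (j + 1) (by omega) (by omega)

lemma pvBitsAux_eq (n t : Nat) : ∀ fuel, t ≤ fuel →
    pvBitsAux fuel (n : Int) ((t : Int) - 1) = pvBitsOf n t := by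
  induction t with
  | zero =>
    intro fuel _
    cases fuel with
    | zero => rfl
    | succ f => simp [pvBitsAux, pvBitsOf]
  | succ s ih =>
    intro fuel hf
    cases fuel with
    | zero => omega
    | succ f =>
      have hmsb : ((s + 1 : Nat) : Int) - 1 ≠ -1 := by push_cast; omega
      have htoNat : (((s + 1 : Nat) : Int) - 1).toNat = s := by omega
      simp only [pvBitsAux, hmsb, if_pos, ne_eq, not_false_eq_true, htoNat]
      have e : ((s + 1 : Nat) : Int) - 1 - 1 = ((s : Nat) : Int) - 1 := by push_cast; ring
      rw [e, ih f (by omega)]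
      rw [pvBitsOf, pvBitsOf, List.range_succ_eq_map]
      simp only [List.map_cons, List.map_map]
      rw [List.cons.injEq]
      refine ⟨?_, ?_⟩
      · rw [← Int.natCast_shiftRight, show (1 : Int) = ((1 : Nat) : Int) from rfl,
            PySem.Int.band_natCast]
        norm_num
      · apply List.map_congr_left
        intro k _
        simp only [Function.comp]
        have hidx : s + 1 - 1 - k.succ = s - 1 - k := by omega
        rw [hidx]

-- low bits: dropping the part above 2^s changes no bit below s
lemma pvBitsOf_mod (K s : Nat) : pvBitsOf (K % 2 ^ s) s = pvBitsOf K s := by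
  rw [pvBitsOf, pvBitsOf]
  apply List.map_congr_left
  intro k hk
  have hk' : k < s := List.mem_range.mp hk
  set i := s - 1 - k with hi
  have his : i < s := by omega
  congr 1
  rw [Nat.shiftRight_eq_div_pow, Nat.shiftRight_eq_div_pow,
      Nat.and_one_is_mod, Nat.and_one_is_mod]
  conv_rhs => rw [← Nat.div_add_mod K (2 ^ s)]
  have hsplit : (2 ^ s * (K / 2 ^ s) + K % 2 ^ s) / 2 ^ i
      = K % 2 ^ s / 2 ^ i + K / 2 ^ s * 2 ^ (s - i) := by
    have h2 : 2 ^ s * (K / 2 ^ s) = (K / 2 ^ s * 2 ^ (s - i)) * 2 ^ i := by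
      rw [mul_assoc, ← pow_add]
      rw [Nat.sub_add_cancel (by omega)]
      ring
    rw [h2, Nat.add_comm, Nat.add_mul_div_right _ _ (Nat.two_pow_pos _)]
  rw [hsplit]
  have h2dvd : 2 ∣ 2 ^ (s - i) := dvd_pow_self 2 (by omega)
  obtain ⟨c, hc⟩ := h2dvd
  rw [hc]
  have hmul : K / 2 ^ s * (2 * c) = 2 * (K / 2 ^ s * c) := by ring
  rw [hmul]
  omega

-- splitting off the top bit of K (K ≥ 1, t = bit_length K)
lemma pvBitsOf_split (K : Nat) (hK : 1 ≤ K) :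
    pvBitsOf K (PySem.Int.bitLength (K : Int)) =
      1 :: pvBitsOf (K % 2 ^ (PySem.Int.bitLength (K : Int) - 1))
        (PySem.Int.bitLength (K : Int) - 1) := by
  set L := PySem.Int.bitLength (K : Int) with hLdef
  have hub : K < 2 ^ L := by
    have := PySem.Int.lt_two_pow_bitLength (K : Int); simpa [← hLdef] using this
  have hlb : 2 ^ (L - 1) ≤ K := by
    have := PySem.Int.two_pow_bitLength_le (K : Int) (Nat.cast_ne_zero.mpr (by omega))
    simpa [← hLdef] using this
  have hL1 : 1 ≤ L := by
    by_contra h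
    have : L = 0 := by omega
    rw [this] at hub
    omega
  obtain ⟨s, hs⟩ : ∃ s, L = s + 1 := ⟨L - 1, by omega⟩
  rw [pvBitsOf_mod]
  rw [hs]
  rw [pvBitsOf, pvBitsOf, List.range_succ_eq_map]
  simp only [List.map_cons, List.map_map, Nat.add_sub_cancel]
  congr 1
  · have hdiv : K >>> s = 1 := by
      rw [Nat.shiftRight_eq_div_pow]
      have h1 : 1 ≤ K / 2 ^ s := (Nat.one_le_div_iff (Nat.two_pow_pos _)).mpr
        (by simpa [hs] using hlb)
      have h2 : K / 2 ^ s < 2 := by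
        rw [Nat.div_lt_iff_lt_mul (Nat.two_pow_pos _)]
        calc K < 2 ^ (s + 1) := by simpa [hs] using hub
        _ = 2 * 2 ^ s := by ring
      omega
    norm_num [hdiv]
  · apply List.map_congr_left
    intro k _
    simp only [Function.comp]
    congr 3
    omega

-- bit_length bounds packaged over Int
lemma pvBitLength_le_of_lt (K b : Nat) (hK : 1 ≤ K) (h : K < 2 ^ b) :
    PySem.Int.bitLength (K : Int) ≤ b := by
  set L := PySem.Int.bitLength (K : Int) with hLdef
  have hlb : 2 ^ (L - 1) ≤ K := by
    have := PySem.Int.two_pow_bitLength_le (K : Int) (Nat.cast_ne_zero.mpr (by omega))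
    simpa [← hLdef] using this
  have : 2 ^ (L - 1) < 2 ^ b := lt_of_le_of_lt hlb h
  have := (Nat.pow_lt_pow_iff_right (by norm_num : 1 < 2)).mp this
  omega

lemma pvZeros_eq (a : Int) (t : Nat) (ha : a = (t : Int)) :
    (PySem.List.pyRange 0 a 1).map (fun _ => (0 : Int)) = List.replicate t 0 := by
  subst ha
  rw [PySem.List.pyRange_of_pos _ _ (by norm_num : (0 : Int) < 1)]
  rcases Nat.eq_zero_or_pos t with rfl | ht
  · rw [if_neg (by norm_num)]
    rfl
  · rw [if_pos (by exact_mod_cast ht)]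
    have hc : (((t : Int) - 0 + 1 - 1) / 1).toNat = t := by
      have h : ((t : Int) - 0 + 1 - 1) / 1 = (t : Int) := by norm_num
      rw [h, Int.toNat_natCast]
    rw [hc]
    simp [List.eq_replicate_iff]

-- one step of the binary expansion, on the reference bit list
lemma pvBitsOf_succ (m t : Nat) :
    pvBitsOf m (t + 1) = pvBitsOf (m / 2) t ++ [((m % 2 : Nat) : Int)] := by
  rw [pvBitsOf, pvBitsOf, List.range_succ, List.map_append]
  congr 1
  · apply List.map_congr_left
    intro k hk
    have hk' : k < t := List.mem_range.mp hk
    have e1 : t + 1 - 1 - k = (t - 1 - k) + 1 := by omega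
    congr 2
    rw [e1, Nat.shiftRight_add, Nat.shiftRight_eq_div_pow, Nat.shiftRight_eq_div_pow, pow_one]
    rw [Nat.div_div_eq_div_mul, Nat.shiftRight_eq_div_pow, Nat.div_div_eq_div_mul, Nat.mul_comm]
  · simp [Nat.and_one_is_mod]

-- pvBinNat m lists exactly the bit_length m bits of m, high to low
lemma pvBinNat_spec (m : Nat) (hm : 1 ≤ m) :
    1 ≤ (pvBinNat m).length ∧
    2 ^ ((pvBinNat m).length - 1) ≤ m ∧ m < 2 ^ (pvBinNat m).length ∧
    (pvBinNat m).map (fun c => if c = '1' then (1 : Int) else 0) =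
      pvBitsOf m (pvBinNat m).length := by
  induction m using Nat.strong_induction_on with
  | _ m ih =>
    obtain ⟨n, rfl⟩ : ∃ n, m = n + 1 := ⟨m - 1, by omega⟩
    rw [pvBinNat]
    by_cases hq : (n + 1) / 2 = 0
    · have hn : n = 0 := by omega
      subst hn
      have e : pvBinNat ((0 + 1) / 2) = [] := by norm_num [pvBinNat]
      rw [e]
      refine ⟨?_, ?_, ?_, ?_⟩ <;> norm_num [pvBitsOf, List.range_succ]
    · have hq1 : 1 ≤ (n + 1) / 2 := by omega
      have hqlt : (n + 1) / 2 < n + 1 := by omega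
      obtain ⟨hl1, hlb, hub, hmap⟩ := ih ((n + 1) / 2) hqlt hq1
      set q := (n + 1) / 2 with hqdef
      set lq := (pvBinNat q).length with hlq
      have hdm : n + 1 = 2 * q + (n + 1) % 2 := by omega
      have hr2 : (n + 1) % 2 < 2 := Nat.mod_lt _ (by norm_num)
      have hpow : 2 ^ lq = 2 * 2 ^ (lq - 1) := by
        conv_lhs => rw [show lq = (lq - 1) + 1 by omega]
        ring
      refine ⟨by simp, ?_, ?_, ?_⟩
      · simp only [List.length_append, List.length_cons, List.length_nil, Nat.zero_add]
        rw [← hlq]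
        have : lq + 1 - 1 = lq := by omega
        rw [this]
        omega
      · simp only [List.length_append, List.length_cons, List.length_nil, Nat.zero_add]
        rw [← hlq]
        have : 2 ^ (lq + 1) = 2 * 2 ^ lq := by ring
        omega
      · simp only [List.length_append, List.length_cons, List.length_nil, Nat.zero_add,
          List.map_append, List.map_cons, List.map_nil]
        rw [← hlq, hmap, pvBitsOf_succ (n + 1) lq, ← hqdef]
        congr 1
        by_cases h2 : (n + 1) % 2 = 1
        · simp [h2]
        · have h0 : (n + 1) % 2 = 0 := by omega
          simp [h0]

-- the length of pvBinNat m is the bit length of m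
lemma pvBinNat_len (m : Nat) (hm : 1 ≤ m) :
    (pvBinNat m).length = PySem.Int.bitLength (m : Int) := by
  obtain ⟨hl1, hlb, hub, -⟩ := pvBinNat_spec m hm
  set a := (pvBinNat m).length with ha
  set L := PySem.Int.bitLength (m : Int) with hLdef
  have hubL : m < 2 ^ L := by
    have := PySem.Int.lt_two_pow_bitLength (m : Int); simpa [← hLdef] using this
  have hlbL : 2 ^ (L - 1) ≤ m := by
    have := PySem.Int.two_pow_bitLength_le (m : Int) (Nat.cast_ne_zero.mpr (by omega))
    simpa [← hLdef] using this
  have hL1 : 1 ≤ L := by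
    by_contra h
    have : L = 0 := by omega
    rw [this] at hubL
    omega
  rcases lt_trichotomy a L with h | h | h
  · have : 2 ^ a ≤ 2 ^ (L - 1) := Nat.pow_le_pow_right (by norm_num) (by omega)
    omega
  · exact h
  · have : 2 ^ L ≤ 2 ^ (a - 1) := Nat.pow_le_pow_right (by norm_num) (by omega)
    omega

-- the per-value encoders agree for every 1 ≤ v < 2^62
lemma pvDelta_eq (v : Int) (h1 : 1 ≤ v) (h2 : v < 2 ^ 62) :
    pvEliasDelta v = pvEncode v := by
  obtain ⟨m, rfl⟩ : ∃ m : Nat, v = (m : Int) :=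
    ⟨v.toNat, (Int.toNat_of_nonneg (by omega)).symm⟩
  have hm1 : 1 ≤ m := by exact_mod_cast h1
  have hm2 : m < 2 ^ 62 := by exact_mod_cast h2
  set L := PySem.Int.bitLength (m : Int) with hLdef
  have hub : m < 2 ^ L := by
    have := PySem.Int.lt_two_pow_bitLength (m : Int); simpa [← hLdef] using this
  have hlb : 2 ^ (L - 1) ≤ m := by
    have := PySem.Int.two_pow_bitLength_le (m : Int) (Nat.cast_ne_zero.mpr (by omega))
    simpa [← hLdef] using this
  have hL1 : 1 ≤ L := by
    by_contra h
    have : L = 0 := by omega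
    rw [this] at hub; omega
  have hL63 : L ≤ 62 := pvBitLength_le_of_lt m 62 hm1 hm2
  -- find_msb / split on m
  have hfind : pvFindMsb (m : Int) = ((L : Int) - 1, ((2 ^ (L - 1) : Nat) : Int)) := by
    rw [pvFindMsb]
    have h0 : (-1 : Int) = ((0 : Nat) : Int) - 1 := by norm_num
    have h0' : (0 : Int) = (2 : Int) ^ 0 - 1 := by norm_num
    rw [h0, h0']
    exact pvFindMsbAux_eq m L hlb hub hL1 64 0 (by omega) (by omega)
  have hsplitm : pvSplit (m : Int) = ((L : Int) - 1, ((m % 2 ^ (L - 1) : Nat) : Int)) := by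
    rw [pvSplit, hfind]
    simp only
    congr 1
    have hc : ((2 ^ (L - 1) : Nat) : Int) - 1 = ((2 ^ (L - 1) - 1 : Nat) : Int) := by
      have : 1 ≤ 2 ^ (L - 1) := Nat.one_le_two_pow
      push_cast [this]; ring
    rw [hc, PySem.Int.band_natCast, Nat.and_two_pow_sub_one_eq_mod]
  -- gamma layer: G = bit_length L
  set G := PySem.Int.bitLength (L : Int) with hGdef
  have hubG : L < 2 ^ G := by
    have := PySem.Int.lt_two_pow_bitLength (L : Int); simpa [← hGdef] using this
  have hlbG : 2 ^ (G - 1) ≤ L := by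
    have := PySem.Int.two_pow_bitLength_le (L : Int) (Nat.cast_ne_zero.mpr (by omega))
    simpa [← hGdef] using this
  have hG1 : 1 ≤ G := by
    by_contra h
    have : G = 0 := by omega
    rw [this] at hubG; omega
  have hG7 : G ≤ 6 := pvBitLength_le_of_lt L 6 hL1 (by omega)
  have hfindL : pvFindMsb ((L : Nat) : Int) = ((G : Int) - 1, ((2 ^ (G - 1) : Nat) : Int)) := by
    rw [pvFindMsb]
    have h0 : (-1 : Int) = ((0 : Nat) : Int) - 1 := by norm_num
    have h0' : (0 : Int) = (2 : Int) ^ 0 - 1 := by norm_num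
    rw [h0, h0']
    exact pvFindMsbAux_eq L G hlbG hubG hG1 64 0 (by omega) (by omega)
  have hsplitL : pvSplit ((L : Nat) : Int) = ((G : Int) - 1, ((L % 2 ^ (G - 1) : Nat) : Int)) := by
    rw [pvSplit, hfindL]
    simp only
    congr 1
    have hc : ((2 ^ (G - 1) : Nat) : Int) - 1 = ((2 ^ (G - 1) - 1 : Nat) : Int) := by
      have : 1 ≤ 2 ^ (G - 1) := Nat.one_le_two_pow
      push_cast [this]; ring
    rw [hc, PySem.Int.band_natCast, Nat.and_two_pow_sub_one_eq_mod]
  -- A side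
  have hbitsL : pvBits ((L % 2 ^ (G - 1) : Nat) : Int) ((G : Int) - 1 - 1)
      = pvBitsOf (L % 2 ^ (G - 1)) (G - 1) := by
    have he : (G : Int) - 1 - 1 = (((G - 1 : Nat)) : Int) - 1 := by push_cast [hG1]; ring
    rw [pvBits, he, pvBitsAux_eq (L % 2 ^ (G - 1)) (G - 1) 64 (by omega)]
  have hbitsm : pvBits ((m % 2 ^ (L - 1) : Nat) : Int) ((L : Int) - 1 - 1)
      = pvBitsOf (m % 2 ^ (L - 1)) (L - 1) := by
    have he : (L : Int) - 1 - 1 = (((L - 1 : Nat)) : Int) - 1 := by push_cast [hL1]; ring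
    rw [pvBits, he, pvBitsAux_eq (m % 2 ^ (L - 1)) (L - 1) 64 (by omega)]
  have hgamma : pvEliasGamma ((L : Nat) : Int) =
      List.replicate (G - 1) (0 : Int) ++ [1] ++ pvBitsOf (L % 2 ^ (G - 1)) (G - 1) := by
    rw [pvEliasGamma, hsplitL]
    simp only
    rw [pvZeros_eq ((G : Int) - 1) (G - 1) (by push_cast [hG1]; ring), hbitsL]
  have hA : pvEliasDelta (m : Int) =
      (List.replicate (G - 1) (0 : Int) ++ [1] ++ pvBitsOf (L % 2 ^ (G - 1)) (G - 1))
        ++ pvBitsOf (m % 2 ^ (L - 1)) (L - 1) := by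
    rw [pvEliasDelta, hsplitm]
    simp only
    have he1 : (L : Int) - 1 + 1 = ((L : Nat) : Int) := by ring
    rw [he1, hgamma, hbitsm]
  -- B side
  have hlenm : (pvBinNat m).length = L := by rw [pvBinNat_len m hm1, ← hLdef]
  have hlenL : (pvBinNat L).length = G := by rw [pvBinNat_len L hL1, ← hGdef]
  have hmapm : (pvBinNat m).map (fun c => if c = '1' then (1 : Int) else 0) = pvBitsOf m L := by
    obtain ⟨-, -, -, h⟩ := pvBinNat_spec m hm1
    rw [h, hlenm]
  have hmapL : (pvBinNat L).map (fun c => if c = '1' then (1 : Int) else 0) = pvBitsOf L G := by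
    obtain ⟨-, -, -, h⟩ := pvBinNat_spec L hL1
    rw [h, hlenL]
  have hbinm : pvBin (m : Int) = pvBinNat m := by
    rw [pvBin, if_neg (by exact_mod_cast (by omega : m ≠ 0)), if_neg (by omega),
        Int.toNat_natCast]
  have hbinL : pvBin ((L : Nat) : Int) = pvBinNat L := by
    rw [pvBin, if_neg (by exact_mod_cast (by omega : L ≠ 0)), if_neg (by omega),
        Int.toNat_natCast]
  have hB : pvEncode (m : Int) =
      List.replicate (G - 1) (0 : Int) ++ pvBitsOf L G ++ (pvBitsOf m L).drop 1 := by
    rw [pvEncode]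
    simp only [hbinm, hlenm, hbinL, hlenL]
    rw [List.map_append, List.map_append, List.map_replicate, List.map_drop, hmapL, hmapm]
    rw [if_neg (by decide : ¬ ('0' : Char) = '1')]
  -- combine
  have hsplitBm : pvBitsOf m L = 1 :: pvBitsOf (m % 2 ^ (L - 1)) (L - 1) := by
    rw [hLdef]
    exact pvBitsOf_split m hm1
  have hsplitBL : pvBitsOf L G = 1 :: pvBitsOf (L % 2 ^ (G - 1)) (G - 1) := by
    rw [hGdef]
    exact pvBitsOf_split L hL1
  rw [hA, hB, hsplitBm, hsplitBL]
  simp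

-- stage-1 values are the values A's loop encodes
lemma pvLoopA_pairs (rest : List Int) : ∀ prev,
    pvLoopA rest (some prev) = (pvValsPairs prev rest).flatMap pvEliasDelta := by
  induction rest with
  | nil => intro prev; rfl
  | cons n r ih =>
    intro prev
    by_cases h : n ≤ prev <;>
      simp [pvLoopA, pvValsPairs, h, ih n, List.append_assoc]

lemma pvLoopA_vals (arr : List Int) :
    pvLoopA arr none = (pvVals arr).flatMap pvEliasDelta := by
  cases arr with
  | nil => rfl
  | cons n rest =>
    simp [pvLoopA, pvVals, pvLoopA_pairs rest n, List.append_assoc]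

lemma pvFlatMap_congr (l : List Int) (f g : Int → List Int)
    (h : ∀ v ∈ l, f v = g v) : l.flatMap f = l.flatMap g := by
  induction l with
  | nil => rfl
  | cons x xs ih =>
    rw [List.flatMap_cons, List.flatMap_cons, h x (List.mem_cons_self ..),
        ih (fun v hv => h v (List.mem_cons_of_mem _ hv))]

lemma pvValsPairs_bound (rest : List Int) : ∀ prev,
    (∀ x ∈ rest, 0 ≤ x ∧ x ≤ 2147483648) → 0 ≤ prev →
    ∀ v ∈ pvValsPairs prev rest, 1 ≤ v ∧ v < 2 ^ 62 := by
  induction rest with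
  | nil => intro prev _ _ v hv; cases hv
  | cons n r ih =>
    intro prev hmem hprev v hv
    obtain ⟨hn0, hn1⟩ := hmem n (List.mem_cons_self ..)
    have hr : ∀ x ∈ r, 0 ≤ x ∧ x ≤ 2147483648 := fun x hx => hmem x (List.mem_cons_of_mem _ hx)
    rw [pvValsPairs, List.mem_append] at hv
    have hbig : (2147483649 : Int) < 2 ^ 62 := by norm_num
    rcases hv with hv | hv
    · by_cases h : n ≤ prev
      · rw [if_pos h] at hv
        simp only [List.mem_cons, List.not_mem_nil, or_false] at hv
        rcases hv with rfl | rfl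
        · exact ⟨le_refl 1, by norm_num⟩
        · exact ⟨by omega, by omega⟩
      · rw [if_neg h] at hv
        simp only [List.mem_cons, List.not_mem_nil, or_false] at hv
        subst hv
        exact ⟨by omega, by omega⟩
    · exact ih n hr hn0 v hv

lemma pvVals_bound (arr : List Int)
    (hdom : ∀ x ∈ arr, 0 ≤ x ∧ x ≤ 2147483648) :
    ∀ v ∈ pvVals arr, 1 ≤ v ∧ v < 2 ^ 62 := by
  cases arr with
  | nil => intro v hv; cases hv
  | cons n rest =>
    intro v hv
    obtain ⟨hn0, hn1⟩ := hdom n (List.mem_cons_self ..)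
    have hbig : (2147483649 : Int) < 2 ^ 62 := by norm_num
    rw [pvVals] at hv
    rcases List.mem_cons.mp hv with rfl | hv'
    · exact ⟨le_refl 1, by norm_num⟩
    rcases List.mem_cons.mp hv' with rfl | hv''
    · exact ⟨by omega, by omega⟩
    · exact pvValsPairs_bound rest n
        (fun x hx => hdom x (List.mem_cons_of_mem _ hx)) hn0 v hv''

-- ===== VERDICT (by name: the statement is the Claim_ definition above) =====
theorem delta_code_array_spec : Claim_equal_delta_code_array := by
  intro arr hdom hpre
  unfold Spec_delta_code_array delta_code_array delta_code_array_alt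
  have hmem : ∀ x ∈ arr, 0 ≤ x ∧ x ≤ 2147483648 := by
    intro x hx
    refine ⟨hpre x hx, ?_⟩
    have := (List.all_eq_true.mp hdom) x hx
    simp only [pvDomInt, decide_eq_true_eq] at this
    omega
  rw [pvLoopA_vals arr]
  exact pvFlatMap_congr _ _ _
    (fun v hv => pvDelta_eq v (pvVals_bound arr hmem v hv).1 (pvVals_bound arr hmem v hv).2)
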